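-- pv_equiv track=rewrite | github.com/riddheshSajwan/data_structures_algorithm | math/veryLargePower.py | solve
-- ===== SOURCE A (Python) =====
-- def solve(A, B):
--
--     def power(x, y, p):
--
--         res = 1        # Initialize result
--
--         x = x % p      # Update x if it is more than or equal to p
--
--         while (y > 0):
--             # If y is odd, multiply x with result
--             if (y & 1):
--                 res = (res * x) % p
--             y = y >> 1
--             x = (x * x) % p
--         return res
--
--     p = int(1e9+7)
--     rem = 1
--     while B > 1:
--         rem *= B%(p-1)
--         B -= 1
--         rem %= p-1
--     return power(A,rem,p)
-- ===== SOURCE B (Python) =====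
-- def solve(A, B):
--     p = 10**9 + 7
--     m = p - 1
--     rem = 1
--     for k in range(2, B + 1):
--         rem = rem * k % m
--         if rem == 0:
--             break  # 0 is absorbing: the rest of the factorial cannot change rem
--     def powmod(x, y):
--         if y <= 0:
--             return 1
--         r = powmod(x * x % p, y >> 1)
--         return r * x % p if (y & 1) else r
--     return powmod(A % p, rem)
-- ===== Notes on version B (the rewrite author's own statement) =====
-- stated objective: alternative
-- what changed: B builds the factorial residue by an ascending product over range(2,B+1) that breaks as soon as the residue hits 0 (0 is absorbing mod 1e9+6), and replaces A's iterative bit-loop modular exponentiation with a recursive square-and-multiply; A instead counts B down, multiplying B%(p-1) and reducing separately each step.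
import Mathlib
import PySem

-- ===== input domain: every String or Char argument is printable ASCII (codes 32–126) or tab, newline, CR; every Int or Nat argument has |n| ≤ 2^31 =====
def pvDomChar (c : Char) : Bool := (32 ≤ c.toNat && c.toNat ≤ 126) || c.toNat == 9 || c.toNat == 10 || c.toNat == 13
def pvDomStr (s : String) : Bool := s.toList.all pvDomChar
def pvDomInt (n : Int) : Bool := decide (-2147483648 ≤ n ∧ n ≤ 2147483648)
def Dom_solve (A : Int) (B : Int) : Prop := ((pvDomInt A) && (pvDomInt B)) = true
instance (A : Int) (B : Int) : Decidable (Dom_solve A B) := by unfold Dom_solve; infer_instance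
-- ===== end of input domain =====

-- B re-implements A's A^(B!) mod 1e9+7 with an ascending factorial product that early-exits once the
-- residue hits 0 (absorbing), and a recursive square-and-multiply instead of A's iterative bit loop.

-- ===== PORT A =====
-- A's inner `power`: while (y > 0) loop carried as structural recursion on y.
-- `y & 1` is ported as `PySem.Int.mod y 2` (exact: Python's y & 1 equals y mod 2 for every int);
-- `y >> 1` as `PySem.Int.floordiv y 2` (exact: Python's arithmetic shift is floor division by 2).
def solvePowerLoop (x : Int) (y : Int) (res : Int) (p : Int) : Int :=
  if _h : y > 0 then
    solvePowerLoop (PySem.Int.mod (x * x) p) (PySem.Int.floordiv y 2)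
      (if PySem.Int.mod y 2 ≠ 0 then PySem.Int.mod (res * x) p else res) p
  else res
termination_by y.toNat
decreasing_by
  unfold PySem.Int.floordiv
  rw [Int.fdiv_eq_ediv]
  omega

def solvePower (x : Int) (y : Int) (p : Int) : Int :=
  solvePowerLoop (PySem.Int.mod x p) y 1 p

-- A's `while B > 1` loop: rem *= B % (p-1); B -= 1; rem %= p-1
def solveRemLoop (B : Int) (rem : Int) : Int :=
  if _h : B > 1 then
    solveRemLoop (B - 1) (PySem.Int.mod (rem * PySem.Int.mod B 1000000006) 1000000006)
  else rem
termination_by B.toNat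
decreasing_by omega

def solve (A : Int) (B : Int) : Int :=
  solvePower A (solveRemLoop B 1) 1000000007

-- ===== PORT B =====
-- Source B's recursive powmod (closure over p, made an explicit parameter; same bit-op ports as above).
def solveAltPow (x : Int) (y : Int) (p : Int) : Int :=
  if _h : y ≤ 0 then 1
  else
    let r := solveAltPow (PySem.Int.mod (x * x) p) (PySem.Int.floordiv y 2) p
    if PySem.Int.mod y 2 ≠ 0 then PySem.Int.mod (r * x) p else r
termination_by y.toNat
decreasing_by
  unfold PySem.Int.floordiv
  rw [Int.fdiv_eq_ediv]
  omega

-- Source B's `for k in range(2, B+1)` with `break` on rem == 0.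
def solveAltRemLoop (ks : List Int) (rem : Int) : Int :=
  match ks with
  | [] => rem
  | k :: ks' =>
    let rem' := PySem.Int.mod (rem * k) 1000000006
    if rem' = 0 then rem' else solveAltRemLoop ks' rem'

def solve_alt (A : Int) (B : Int) : Int :=
  solveAltPow (PySem.Int.mod A 1000000007) (solveAltRemLoop (PySem.List.pyRange 2 (B + 1) 1) 1) 1000000007

-- ===== PRECONDITION & SPEC =====
def Spec_solve (A : Int) (B : Int) (out : Int) : Prop := out = solve_alt A B
instance (A : Int) (B : Int) (out : Int) : Decidable (Spec_solve A B out) := by unfold Spec_solve; infer_instance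

-- ===== CLAIM (what is proved, stated in full; the proofs are below) =====
def Claim_equal_solve : Prop := ∀ (A : Int) (B : Int), Dom_solve A B → Spec_solve A B (solve A B)

-- ===== LEMMAS AND PROOFS =====

-- PySem.Int.mod / floordiv with the positive literal divisors used by the ports
theorem pvModM (a : Int) : PySem.Int.mod a 1000000006 = a % 1000000006 :=
  PySem.Int.mod_eq_emod_of_pos (by norm_num)
theorem pvModP (a : Int) : PySem.Int.mod a 1000000007 = a % 1000000007 :=
  PySem.Int.mod_eq_emod_of_pos (by norm_num)
theorem pvMod2 (a : Int) : PySem.Int.mod a 2 = a % 2 :=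
  PySem.Int.mod_eq_emod_of_pos (by norm_num)
theorem pvFdiv2 (a : Int) : PySem.Int.floordiv a 2 = a / 2 := by
  unfold PySem.Int.floordiv; rw [Int.fdiv_eq_ediv]; simp

-- modular-product juggling
theorem pvMulModL (a b n : Int) : a % n * b % n = a * b % n := by
  rw [Int.mul_emod, Int.emod_emod_of_dvd _ dvd_rfl, ← Int.mul_emod]

-- controlled one-step unfoldings (the ports are well-founded recursions)
theorem pvPowLoop_pos (x y res p : Int) (h : y > 0) :
    solvePowerLoop x y res p = solvePowerLoop (PySem.Int.mod (x * x) p) (PySem.Int.floordiv y 2)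
      (if PySem.Int.mod y 2 ≠ 0 then PySem.Int.mod (res * x) p else res) p := by
  rw [solvePowerLoop, dif_pos h]
theorem pvPowLoop_neg (x y res p : Int) (h : ¬ y > 0) : solvePowerLoop x y res p = res := by
  rw [solvePowerLoop, dif_neg h]
theorem pvAltPow_pos (x y p : Int) (h : ¬ y ≤ 0) :
    solveAltPow x y p =
      (if PySem.Int.mod y 2 ≠ 0 then
        PySem.Int.mod (solveAltPow (PySem.Int.mod (x * x) p) (PySem.Int.floordiv y 2) p * x) p
      else solveAltPow (PySem.Int.mod (x * x) p) (PySem.Int.floordiv y 2) p) := by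
  rw [solveAltPow, dif_neg h]
theorem pvAltPow_neg (x y p : Int) (h : y ≤ 0) : solveAltPow x y p = 1 := by
  rw [solveAltPow, dif_pos h]

-- the factorial product 2·3·…·B that A's rem loop accumulates
def pvProd (B : Int) : Int :=
  if _h : B > 1 then B * pvProd (B - 1) else 1
termination_by B.toNat
decreasing_by omega

theorem pvProd_pos (B : Int) (h : B > 1) : pvProd B = B * pvProd (B - 1) := by
  rw [pvProd, dif_pos h]
theorem pvProd_neg (B : Int) (h : ¬ B > 1) : pvProd B = 1 := by
  rw [pvProd, dif_neg h]
theorem pvProd_two : pvProd 2 = 2 := by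
  rw [pvProd_pos 2 (by norm_num), show (2:Int) - 1 = 1 by norm_num,
    pvProd_neg 1 (by norm_num), mul_one]

theorem pvRemA (B rem : Int) :
    solveRemLoop B rem = if 1 < B then rem * pvProd B % 1000000006 else rem := by
  fun_induction solveRemLoop B rem with
  | case1 B rem h ih =>
    rw [if_pos h, ih]
    simp only [pvModM]
    by_cases h2 : 1 < B - 1
    · rw [if_pos h2, pvProd_pos B h]
      conv_lhs => rw [pvMulModL (rem * (B % 1000000006)) (pvProd (B - 1)) 1000000006]
      conv_lhs => rw [show rem * (B % 1000000006) * pvProd (B - 1)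
          = (B % 1000000006) * (rem * pvProd (B - 1)) by ring,
        pvMulModL B (rem * pvProd (B - 1)) 1000000006]
      ring_nf
    · have hB : B = 2 := by omega
      subst hB
      rw [if_neg h2, pvProd_two]
      conv_lhs => rw [show rem * ((2:Int) % 1000000006) = ((2:Int) % 1000000006) * rem by ring,
        pvMulModL 2 rem 1000000006]
      ring_nf
  | case2 B rem h => rw [if_neg (by omega)]

theorem pvRemAlt (ks : List Int) (rem : Int) (h : ks ≠ []) :
    solveAltRemLoop ks rem = rem * ks.prod % 1000000006 := by
  induction ks generalizing rem with
  | nil => exact absurd rfl h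
  | cons k ks' ih =>
    rw [solveAltRemLoop]
    simp only [pvModM, List.prod_cons]
    by_cases h0 : rem * k % 1000000006 = 0
    · rw [if_pos h0]
      conv_rhs => rw [show rem * (k * ks'.prod) = rem * k * ks'.prod by ring,
        ← pvMulModL (rem * k) ks'.prod 1000000006, h0, zero_mul]
      rw [Int.zero_emod]
      exact h0
    · rw [if_neg h0]
      cases ks' with
      | nil => simp [solveAltRemLoop]
      | cons a l =>
        rw [ih _ (by simp), pvMulModL (rem * k) ((a :: l).prod) 1000000006]
        ring_nf
theorem pvRangeProdAux : ∀ (n : Nat) (B : Int), B.toNat = n → 1 < B →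
    (PySem.List.pyRange 2 (B + 1) 1).prod = pvProd B := by
  intro n
  induction n using Nat.strong_induction_on with
  | _ n ih =>
    intro B hB h1
    rw [PySem.List.pyRange_one_succ_right (by omega), List.prod_append, pvProd_pos B h1]
    by_cases h2 : 1 < B - 1
    · rw [show PySem.List.pyRange 2 B 1 = PySem.List.pyRange 2 (B - 1 + 1) 1 by norm_num,
        ih (B - 1).toNat (by omega) (B - 1) rfl h2]
      simp [mul_comm]
    · have hB2 : B = 2 := by omega
      subst hB2
      rw [show (2:Int) = 1 + 1 by norm_num, PySem.List.pyRange_one_eq_nil (by norm_num)]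
      rw [show (1:Int) + 1 - 1 = 1 by norm_num, pvProd_neg 1 (by norm_num)]
      simp

theorem pvRangeProd (B : Int) (h : 1 < B) :
    (PySem.List.pyRange 2 (B + 1) 1).prod = pvProd B :=
  pvRangeProdAux B.toNat B rfl h

-- for positive exponent, Source B's powmod returns a value already reduced mod 1e9+7
theorem pvAltReduced : ∀ (n : Nat) (y x : Int), y.toNat = n → 0 < y →
    solveAltPow x y 1000000007 % 1000000007 = solveAltPow x y 1000000007 := by
  intro n
  induction n using Nat.strong_induction_on with
  | _ n ih =>
    intro y x hn hy
    rw [pvAltPow_pos x y 1000000007 (by omega)]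
    simp only [pvMod2, pvFdiv2, pvModP]
    by_cases hodd : y % 2 ≠ 0
    · rw [if_pos hodd, Int.emod_emod_of_dvd _ dvd_rfl]
    · rw [if_neg hodd]
      exact ih (y / 2).toNat (by omega) _ _ rfl (by omega)

theorem pvPowEq : ∀ (n : Nat) (y x res : Int), y.toNat = n → 0 < y →
    solvePowerLoop x y res 1000000007 = res * solveAltPow x y 1000000007 % 1000000007 := by
  intro n
  induction n using Nat.strong_induction_on with
  | _ n ih =>
    intro y x res hn hy
    rw [pvPowLoop_pos x y res 1000000007 hy, pvAltPow_pos x y 1000000007 (by omega)]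
    simp only [pvMod2, pvFdiv2, pvModP]
    by_cases h2 : 0 < y / 2
    · rw [ih (y / 2).toNat (by omega) _ _ _ rfl h2]
      set r := solveAltPow (x * x % 1000000007) (y / 2) 1000000007 with hr
      by_cases hodd : y % 2 ≠ 0
      · rw [if_pos hodd, if_pos hodd]
        conv_lhs => rw [pvMulModL (res * x) r 1000000007]
        conv_rhs => rw [show res * (r * x % 1000000007) = (r * x % 1000000007) * res by ring,
          pvMulModL (r * x) res 1000000007]
        ring_nf
      · rw [if_neg hodd, if_neg hodd]
    · have hy1 : y = 1 := by omega
      subst hy1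
      norm_num
      rw [pvPowLoop_neg _ _ _ _ (by norm_num), pvAltPow_neg _ _ _ (by norm_num)]
      conv_rhs => rw [one_mul, show res * (x % 1000000007) = (x % 1000000007) * res by ring,
        pvMulModL x res 1000000007]
      ring_nf

-- ===== VERDICT (by name: the statement is the Claim_ definition above) =====
theorem solve_spec : Claim_equal_solve := by
  unfold Claim_equal_solve Spec_solve
  intro A B _
  unfold solve solve_alt solvePower
  by_cases hB : 1 < B
  · have hA : solveRemLoop B 1 = pvProd B % 1000000006 := by
      rw [pvRemA, if_pos hB, one_mul]
    have hAlt : solveAltRemLoop (PySem.List.pyRange 2 (B + 1) 1) 1 = pvProd B % 1000000006 := by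
      have hne : PySem.List.pyRange 2 (B + 1) 1 ≠ [] := by
        rw [PySem.List.pyRange_one_cons (by omega)]; simp
      rw [pvRemAlt _ _ hne, one_mul, pvRangeProd B hB]
    rw [hA, hAlt]
    set r := pvProd B % 1000000006 with hr
    have hr0 : 0 ≤ r := Int.emod_nonneg _ (by norm_num)
    by_cases hpos : 0 < r
    · rw [pvPowEq r.toNat _ _ _ rfl hpos, one_mul,
        pvAltReduced r.toNat _ _ rfl hpos]
    · have h0 : r = 0 := by omega
      rw [h0, pvPowLoop_neg _ _ _ _ (by norm_num), pvAltPow_neg _ _ _ (by norm_num)]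
  · have hA : solveRemLoop B 1 = 1 := by rw [solveRemLoop, dif_neg hB]
    have hAlt : solveAltRemLoop (PySem.List.pyRange 2 (B + 1) 1) 1 = 1 := by
      rw [PySem.List.pyRange_one_eq_nil (by omega), solveAltRemLoop]
    rw [hA, hAlt, pvPowEq 1 1 _ _ rfl (by norm_num), one_mul,
      pvAltReduced 1 1 _ rfl (by norm_num)]
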